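-- pv_equiv track=rewrite | github.com/flowHF/hcv2-prl-figures | Nsigma/nsigma.py | filter_bins
-- ===== SOURCE A (Python) =====
-- def filter_bins(original_bins, target_bins):
--     """Filter original bins to the target range
--
--     Args:
--         original_bins: Original bin boundaries
--         target_bins: Target range [min, max]
--
--     Returns:
--         Filtered bin boundaries within target range
--     """
--     min_t, max_t = target_bins
--     filtered = [b for b in original_bins if min_t <= b <= max_t]
--
--     if filtered and filtered[0] > min_t:
--         filtered.insert(0, min_t)
--     if filtered and filtered[-1] < max_t:
--         filtered.append(max_t)
--
--     return sorted(list(set(filtered)))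
-- ===== SOURCE B (Python) =====
-- def filter_bins(original_bins, target_bins):
--     min_t, max_t = target_bins
--     if not any(min_t <= b <= max_t for b in original_bins):
--         return []
--     out = [min_t]
--     for b in sorted(set(original_bins)):
--         if min_t < b < max_t:
--             out.append(b)
--     if min_t < max_t:
--         out.append(max_t)
--     return out
-- ===== Notes on version B (the rewrite author's own statement) =====
-- stated objective: alternative
-- what changed: Instead of A's filter-then-patch-then-dedup-then-sort pipeline, B first tests emptiness with any(), then builds the sorted output directly in order: min_t, the strictly interior elements of sorted(set(original_bins)), then max_t when min_t < max_t; no final sort or dedup of the result and no positional head/last branches.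
import Mathlib
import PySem

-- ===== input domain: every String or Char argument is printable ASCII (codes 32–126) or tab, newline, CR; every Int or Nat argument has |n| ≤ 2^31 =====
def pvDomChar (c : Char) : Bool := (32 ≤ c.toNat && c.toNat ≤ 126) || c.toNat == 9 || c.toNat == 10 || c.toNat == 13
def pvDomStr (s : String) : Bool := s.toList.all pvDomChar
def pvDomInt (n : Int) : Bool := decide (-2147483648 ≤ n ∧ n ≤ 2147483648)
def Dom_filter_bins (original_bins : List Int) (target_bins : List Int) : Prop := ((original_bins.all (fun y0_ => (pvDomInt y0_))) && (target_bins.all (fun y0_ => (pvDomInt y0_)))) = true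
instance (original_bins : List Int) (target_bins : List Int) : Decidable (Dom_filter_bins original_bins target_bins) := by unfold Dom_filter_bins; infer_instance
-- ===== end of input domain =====

-- B builds the sorted result directly in order (min_t, then the strictly interior elements of
-- sorted(set(original_bins)), then max_t when min_t < max_t) after an any() emptiness test,
-- instead of A's filter / positional endpoint patches / dedup / final sort; objective: alternative.

-- ===== PORT A =====
def filter_bins (original_bins : List Int) (target_bins : List Int) : List Int :=
  match target_bins with
  | min_t :: rest1 =>
    match rest1 with
    | max_t :: rest2 =>
      match rest2 with
      | [] =>
        let filtered := original_bins.filter (fun b => decide (min_t ≤ b) && decide (b ≤ max_t))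
        let f1 := match filtered.head? with
          | some h => if min_t < h then min_t :: filtered else filtered
          | none => filtered
        let f2 := match f1.getLast? with
          | some l => if l < max_t then f1 ++ [max_t] else f1
          | none => f1
        PySem.List.sorted (PySem.Set.ofList f2) (fun x => x) false
      | _ => []  -- unpacking raises (too many values); excluded by Pre_filter_bins
    | [] => []  -- unpacking raises (not enough values); excluded by Pre_filter_bins
  | [] => []  -- unpacking raises (not enough values); excluded by Pre_filter_bins

-- ===== PORT B =====
def filter_bins_alt (original_bins : List Int) (target_bins : List Int) : List Int :=
  match target_bins with
  | [] => []  -- unpacking raises (not enough values); excluded by Pre_filter_bins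
  | min_t :: rest =>
    match rest with
    | [] => []  -- unpacking raises (not enough values); excluded by Pre_filter_bins
    | max_t :: rest2 =>
      if rest2 = [] then
        if !(original_bins.any (fun b => decide (min_t ≤ b) && decide (b ≤ max_t))) then []
        else
          let su := PySem.List.sorted (PySem.Set.ofList original_bins) (fun x => x) false
          let out := su.foldl
            (fun acc b => if decide (min_t < b) && decide (b < max_t) then acc ++ [b] else acc)
            [min_t]
          if min_t < max_t then out ++ [max_t] else out
      else []  -- unpacking raises (too many values); excluded by Pre_filter_bins

-- ===== PRECONDITION & SPEC =====
-- Pre_ excludes only target_bins whose length is not 2, where A's tuple unpacking raises ValueError.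
def Pre_filter_bins (_original_bins : List Int) (target_bins : List Int) : Prop :=
  target_bins.length = 2
instance (original_bins : List Int) (target_bins : List Int) : Decidable (Pre_filter_bins original_bins target_bins) := by unfold Pre_filter_bins; infer_instance

def pvWitness_filter_bins : List Int × List Int := ([5, 3, 7, 3], [2, 8])

def Spec_filter_bins (original_bins : List Int) (target_bins : List Int) (out : List Int) : Prop := out = filter_bins_alt original_bins target_bins
instance (original_bins : List Int) (target_bins : List Int) (out : List Int) : Decidable (Spec_filter_bins original_bins target_bins out) := by unfold Spec_filter_bins; infer_instance

-- ===== CLAIM (what is proved, stated in full; the proofs are below) =====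
def Claim_equal_filter_bins : Prop := ∀ (original_bins : List Int) (target_bins : List Int), Dom_filter_bins original_bins target_bins → Pre_filter_bins original_bins target_bins → Spec_filter_bins original_bins target_bins (filter_bins original_bins target_bins)

-- ===== LEMMAS AND PROOFS =====

-- Membership of A's endpoint-patched list f2: when filtered is non-empty and its elements lie
-- in [min_t, max_t], f2's members are exactly filtered's members plus both endpoints.
theorem mem_f2 (min_t max_t : Int) (filtered : List Int)
    (hne : filtered ≠ [])
    (hlo : ∀ x ∈ filtered, min_t ≤ x) (hhi : ∀ x ∈ filtered, x ≤ max_t) (a : Int) :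
    (a ∈ (match (match filtered.head? with
          | some h => if min_t < h then min_t :: filtered else filtered
          | none => filtered).getLast? with
        | some l => if l < max_t then (match filtered.head? with
            | some h => if min_t < h then min_t :: filtered else filtered
            | none => filtered) ++ [max_t] else (match filtered.head? with
            | some h => if min_t < h then min_t :: filtered else filtered
            | none => filtered)
        | none => (match filtered.head? with
            | some h => if min_t < h then min_t :: filtered else filtered
            | none => filtered))) ↔ (a ∈ filtered ∨ a = min_t ∨ a = max_t) := by
  obtain ⟨h, t, rfl⟩ := List.exists_cons_of_ne_nil hne
  have hh : min_t ≤ h := hlo h (by simp)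
  have hL : (h :: t).getLast? = some ((h :: t).getLast (List.cons_ne_nil h t)) :=
    List.getLast?_eq_some_getLast _
  set L := (h :: t).getLast (List.cons_ne_nil h t) with hLdef
  have hLmem : L ∈ h :: t := List.getLast_mem _
  have hLle : L ≤ max_t := hhi _ hLmem
  simp only [List.head?_cons]
  by_cases h1 : min_t < h
  · rw [if_pos h1, List.getLast?_cons_cons, hL]
    show (a ∈ if L < max_t then (min_t :: h :: t) ++ [max_t] else min_t :: h :: t) ↔ _
    by_cases h2 : L < max_t
    · rw [if_pos h2]; simp only [List.mem_append, List.mem_cons]; tauto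
    · rw [if_neg h2]
      have hmax : max_t ∈ h :: t := le_antisymm hLle (not_lt.mp h2) ▸ hLmem
      simp only [List.mem_cons] at hmax ⊢
      constructor
      · tauto
      · rintro (hm | rfl | rfl)
        · tauto
        · tauto
        · rcases hmax with rfl | hm <;> tauto
  · rw [if_neg h1, hL]
    have hmeq : h = min_t := le_antisymm (not_lt.mp h1) hh
    show (a ∈ if L < max_t then (h :: t) ++ [max_t] else h :: t) ↔
      (a ∈ h :: t ∨ a = min_t ∨ a = max_t)
    rw [← hmeq]
    by_cases h2 : L < max_t
    · rw [if_pos h2]; simp only [List.mem_append, List.mem_cons]; tauto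
    · rw [if_neg h2]
      have hmax : max_t ∈ h :: t := le_antisymm hLle (not_lt.mp h2) ▸ hLmem
      simp only [List.mem_cons] at hmax ⊢
      constructor
      · tauto
      · rintro (hm | rfl | rfl)
        · tauto
        · tauto
        · rcases hmax with rfl | hm <;> tauto

-- ===== VERDICT (by name: the statement is the Claim_ definition above) =====
theorem filter_bins_spec : Claim_equal_filter_bins := by
  intro original_bins target_bins _ hpre
  unfold Spec_filter_bins filter_bins filter_bins_alt
  match target_bins, hpre with
  | [min_t, max_t], _ =>
    simp only [reduceIte]
    set p : Int → Bool := fun b => decide (min_t ≤ b) && decide (b ≤ max_t) with hp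
    set filtered := original_bins.filter p with hf
    by_cases hne : filtered = []
    · have hany : original_bins.any p = false := by
        simp only [List.any_eq_false]
        intro x hx
        have := List.filter_eq_nil_iff.mp hne x hx
        simpa using this
      rw [hne, hany]
      simp [PySem.Set.ofList, PySem.List.sorted]
    · have hmem : ∀ x ∈ filtered, x ∈ original_bins ∧ min_t ≤ x ∧ x ≤ max_t := by
        intro x hx
        have h1 := List.mem_of_mem_filter hx
        have h2 := List.of_mem_filter hx
        simp only [hp, Bool.and_eq_true, decide_eq_true_eq] at h2
        exact ⟨h1, h2⟩
      have hlo : ∀ x ∈ filtered, min_t ≤ x := fun x hx => (hmem x hx).2.1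
      have hhi : ∀ x ∈ filtered, x ≤ max_t := fun x hx => (hmem x hx).2.2
      obtain ⟨w, hw⟩ := List.exists_mem_of_ne_nil _ hne
      have hwm := hmem w hw
      have hminmax : min_t ≤ max_t := le_trans hwm.2.1 hwm.2.2
      have hany : original_bins.any p = true := by
        rw [List.any_eq_true]
        refine ⟨w, hwm.1, ?_⟩
        simp [hp, hwm.2.1, hwm.2.2]
      rw [hany]
      simp only [Bool.not_true, Bool.false_eq_true, if_false]
      set su := PySem.List.sorted (PySem.Set.ofList original_bins) (fun x => x) false with hsu
      set q : Int → Bool := fun b => decide (min_t < b) && decide (b < max_t) with hq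
      have hfold : su.foldl (fun acc b => if q b then acc ++ [b] else acc) [min_t]
          = [min_t] ++ su.filter q := PySem.List.foldl_append_if_eq_filter q su [min_t]
      set interior := su.filter q with hint
      have hintmem : ∀ x ∈ interior, x ∈ original_bins ∧ min_t < x ∧ x < max_t := by
        intro x hx
        have h1 := List.mem_of_mem_filter hx
        have h2 := List.of_mem_filter hx
        rw [hsu, PySem.List.mem_sorted, PySem.Set.mem_ofList] at h1
        simp only [hq, Bool.and_eq_true, decide_eq_true_eq] at h2
        exact ⟨h1, h2⟩
      have hintpw : interior.Pairwise (· < ·) :=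
        List.Pairwise.filter q (PySem.List.sorted_ofList_pairwise_lt original_bins)
      -- the candidate output list
      set tailL := if min_t < max_t then [max_t] else ([] : List Int) with htl
      have hys : (if min_t < max_t then
            (su.foldl (fun acc b => if q b then acc ++ [b] else acc) [min_t]) ++ [max_t]
          else su.foldl (fun acc b => if q b then acc ++ [b] else acc) [min_t])
          = min_t :: (interior ++ tailL) := by
        by_cases h3 : min_t < max_t <;> simp [h3, hfold, htl, hint]
      rw [hys]
      -- strict sortedness of the candidate
      have hpair : (min_t :: (interior ++ tailL)).Pairwise (· < ·) := by
        rw [List.pairwise_cons]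
        constructor
        · intro b hb
          rcases List.mem_append.mp hb with hb | hb
          · exact (hintmem b hb).2.1
          · rw [htl] at hb
            by_cases h3 : min_t < max_t
            · rw [if_pos h3] at hb; simp at hb; omega
            · rw [if_neg h3] at hb; simp at hb
        · rw [List.pairwise_append]
          refine ⟨hintpw, ?_, ?_⟩
          · by_cases h3 : min_t < max_t <;> simp [htl, h3]
          · intro a ha b hb
            rw [htl] at hb
            by_cases h3 : min_t < max_t
            · rw [if_pos h3] at hb; simp at hb
              have := (hintmem a ha).2.2; omega
            · rw [if_neg h3] at hb; simp at hb
      have hnd : (min_t :: (interior ++ tailL)).Nodup :=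
        hpair.imp (fun h => ne_of_lt h)
      -- same members as A's deduplicated patched list
      apply PySem.List.sorted_eq_of_perm_of_pairwise_lt
      · rw [List.perm_ext_iff_of_nodup hnd (PySem.Set.nodup_ofList _)]
        intro a
        rw [PySem.Set.mem_ofList, mem_f2 min_t max_t filtered hne hlo hhi a]
        simp only [List.mem_cons, List.mem_append]
        constructor
        · rintro (rfl | h | h)
          · tauto
          · have := hintmem a h
            have hmf : a ∈ filtered := by
              rw [hf, List.mem_filter]
              refine ⟨this.1, ?_⟩
              simp [hp]; omega
            tauto
          · rw [htl] at h
            by_cases h3 : min_t < max_t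
            · rw [if_pos h3] at h; simp at h; tauto
            · rw [if_neg h3] at h; simp at h
        · rintro (h | rfl | rfl)
          · have := hmem a h
            rcases eq_or_lt_of_le this.2.1 with rfl | hlt
            · tauto
            · rcases eq_or_lt_of_le this.2.2 with rfl | hlt2
              · right; right; rw [htl, if_pos (lt_of_le_of_lt (le_refl min_t) hlt)]
                simp
              · right; left
                rw [hint, List.mem_filter]
                refine ⟨?_, ?_⟩
                · rw [hsu, PySem.List.mem_sorted, PySem.Set.mem_ofList]; exact this.1
                · simp [hq]; omega
          · tauto
          · rcases eq_or_lt_of_le hminmax with rfl | h3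
            · tauto
            · right; right; rw [htl, if_pos h3]; simp
      · exact hpair
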